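-- pv_equiv track=rewrite | github.com/paytongagne/ADS | solutions/teacher/driving_licenses.py | process_operations
-- ===== SOURCE A (Python) =====
-- class LicenseSystem:
--     def __init__(self):
--         self.drivers = {}  # Stores drivers and their points
--         # Tracks number of drivers per points
--         self.points_count = {i: 0 for i in range(16)} # O(16)
--
--     def nuevo(self, dni): # O(1)
--         if dni in self.drivers:
--             raise ValueError("Conductor duplicado")
--         self.drivers[dni] = 15
--         self.points_count[15] += 1
--
--     def quitar(self, dni, puntos): # O(1)
--         if dni not in self.drivers:
--             raise ValueError("Conductor inexistente")
--
--         current_points = self.drivers[dni]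
--         self.points_count[current_points] -= 1
--         new_points = max(0, current_points - puntos)
--         self.drivers[dni] = new_points
--         self.points_count[new_points] += 1
--
--     def consultar(self, dni): # O(1)
--         if dni not in self.drivers:
--             raise ValueError("Conductor inexistente")
--         return self.drivers[dni]
--
--     def cuantos_con_puntos(self, puntos): # O(1)
--         if puntos < 0 or puntos > 15:
--             raise ValueError("Puntos no validos")
--         return self.points_count[puntos]
--
-- def process_operations(operations): # O(p), p is the number of operaitons
--     system = LicenseSystem()
--     output = []
--
--     for op in operations:
--         parts = op.split()
--         command = parts[0]
--         try:
--             if command == "nuevo":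
--                 system.nuevo(parts[1])
--             elif command == "quitar":
--                 system.quitar(parts[1], int(parts[2]))
--             elif command == "consultar":
--                 points = system.consultar(parts[1])
--                 output.append(f"Puntos de {parts[1]}: {points}")
--             elif command == "cuantos_con_puntos":
--                 count = system.cuantos_con_puntos(int(parts[1]))
--                 output.append(f"Con {parts[1]} puntos hay {count}")
--         except ValueError as e:
--             output.append(f"ERROR: {e}")
--
--     return output
-- ===== SOURCE B (Python) =====
-- def process_operations(operations):
--     # Event-sourcing instead of mutable state: keep a log of applied events
--     # ('new', dni) / ('sub', dni, puntos) and answer every query by replaying it.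
--     log = []
--     output = []
--
--     def registered(dni):
--         return any(e[0] == 'new' and e[1] == dni for e in log)
--
--     def points(dni):
--         p = 15
--         for e in log:
--             if e[0] == 'sub' and e[1] == dni:
--                 p = max(0, p - e[2])
--         return p
--
--     for op in operations:
--         parts = op.split()
--         command = parts[0]
--         if command == "nuevo":
--             if registered(parts[1]):
--                 output.append("ERROR: Conductor duplicado")
--             else:
--                 log.append(('new', parts[1]))
--         elif command == "quitar":
--             dni = parts[1]
--             try:
--                 puntos = int(parts[2])
--             except ValueError as e:
--                 output.append(f"ERROR: {e}")
--                 continue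
--             if registered(dni):
--                 log.append(('sub', dni, puntos))
--             else:
--                 output.append("ERROR: Conductor inexistente")
--         elif command == "consultar":
--             if registered(parts[1]):
--                 output.append(f"Puntos de {parts[1]}: {points(parts[1])}")
--             else:
--                 output.append("ERROR: Conductor inexistente")
--         elif command == "cuantos_con_puntos":
--             try:
--                 puntos = int(parts[1])
--             except ValueError as e:
--                 output.append(f"ERROR: {e}")
--                 continue
--             if puntos < 0 or puntos > 15:
--                 output.append("ERROR: Puntos no validos")
--             else:
--                 count = sum(1 for e in log if e[0] == 'new' and points(e[1]) == puntos)
--                 output.append(f"Con {parts[1]} puntos hay {count}")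
--     return output
-- ===== Notes on version B (the rewrite author's own statement) =====
-- stated objective: alternative
-- what changed: Replaced A's mutable state (drivers dict plus incrementally maintained points_count histogram, wrapped in a class with exceptions) by an append-only event log: B records ('new',dni)/('sub',dni,puntos) events and answers every query by replaying the log (registration = membership scan, points = fold of clamped subtractions, histogram query = count of replayed drivers); all output strings and append order are identical, including the caught int() ValueError messages.
-- outside the precondition, e.g. on process_operations(['nuevo a', 'quitar a 10', 'quitar a -3']): A returns [], B returns []; on process_operations(['nuevo a', 'quitar a 1', 'quitar a -3']): A raises KeyError, B returns []
import Mathlib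
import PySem

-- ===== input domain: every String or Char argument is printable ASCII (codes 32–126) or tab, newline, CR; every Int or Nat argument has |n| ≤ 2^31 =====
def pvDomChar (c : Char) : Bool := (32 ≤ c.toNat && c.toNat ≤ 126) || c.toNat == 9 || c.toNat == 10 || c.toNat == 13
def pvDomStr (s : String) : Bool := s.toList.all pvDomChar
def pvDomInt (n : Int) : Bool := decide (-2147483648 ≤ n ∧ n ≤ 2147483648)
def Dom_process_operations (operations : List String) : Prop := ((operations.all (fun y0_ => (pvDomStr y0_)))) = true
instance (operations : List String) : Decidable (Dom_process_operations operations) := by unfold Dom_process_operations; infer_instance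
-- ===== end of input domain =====

-- B replaces A's mutable drivers/points_count state by an append-only event log that is
-- replayed per query (objective: alternative — different data structure, same outputs).

-- shared helper: the string of ValueError raised by int(s) and caught by both Pythons —
-- "invalid literal for int() with base 10: " + repr(s) truncated to 200 chars (CPython's %.200R);
-- exact on Dom's charset (printable ASCII, tab, newline, CR)
def pvEsc (q : Char) (c : Char) : List Char :=
  if c = '\\' then ['\\', '\\']
  else if c = q then ['\\', q]
  else if c = '\t' then ['\\', 't']
  else if c = '\n' then ['\\', 'n']
  else if c = '\r' then ['\\', 'r']
  else [c]

def pvIntErr (s : String) : String :=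
  let cs := s.toList
  let q := if cs.contains '\'' && !(cs.contains '"') then '"' else '\''
  "ERROR: invalid literal for int() with base 10: " ++
    String.ofList ((q :: cs.flatMap (pvEsc q) ++ [q]).take 200)

-- ===== PORT A =====
-- state: (drivers, points_count, output)
def pvA_step (st : PySem.Dict String Int × PySem.Dict Int Int × List String) (op : String) :
    PySem.Dict String Int × PySem.Dict Int Int × List String :=
  match st with
  | (drivers, counts, output) =>
    match PySem.Str.split₀ op with
    | [] => (drivers, counts, output)                 -- parts[0]: IndexError (outside Pre_)
    | cmd :: rest =>
      if cmd = "nuevo" then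
        match rest with
        | [] => (drivers, counts, output)             -- parts[1]: IndexError (outside Pre_)
        | dni :: _ =>
          if drivers.contains dni then
            (drivers, counts, output ++ ["ERROR: Conductor duplicado"])
          else
            (drivers.insert dni 15, counts.insert 15 (counts.getD 15 0 + 1), output)
      else if cmd = "quitar" then
        match rest with
        | dni :: sp :: _ =>
          match PySem.Int.ofStr? sp with
          | none => (drivers, counts, output ++ [pvIntErr sp])   -- int() ValueError, caught
          | some puntos =>
            if drivers.contains dni then
              let cur := drivers.getD dni 0
              let counts1 := counts.insert cur (counts.getD cur 0 - 1)
              let np := max 0 (cur - puntos)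
              (drivers.insert dni np, counts1.insert np (counts1.getD np 0 + 1), output)
            else (drivers, counts, output ++ ["ERROR: Conductor inexistente"])
        | _ => (drivers, counts, output)              -- IndexError (outside Pre_)
      else if cmd = "consultar" then
        match rest with
        | [] => (drivers, counts, output)             -- IndexError (outside Pre_)
        | dni :: _ =>
          if drivers.contains dni then
            (drivers, counts, output ++ ["Puntos de " ++ dni ++ ": " ++ PySem.Int.toStr (drivers.getD dni 0)])
          else (drivers, counts, output ++ ["ERROR: Conductor inexistente"])
      else if cmd = "cuantos_con_puntos" then
        match rest with
        | [] => (drivers, counts, output)             -- IndexError (outside Pre_)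
        | s :: _ =>
          match PySem.Int.ofStr? s with
          | none => (drivers, counts, output ++ [pvIntErr s])    -- int() ValueError, caught
          | some puntos =>
            if puntos < 0 ∨ 15 < puntos then
              (drivers, counts, output ++ ["ERROR: Puntos no validos"])
            else
              (drivers, counts, output ++ ["Con " ++ s ++ " puntos hay " ++ PySem.Int.toStr (counts.getD puntos 0)])
      else (drivers, counts, output)

-- points_count = {i: 0 for i in range(16)}
def pvA_counts0 : PySem.Dict Int Int :=
  (PySem.List.pyRange 0 16 1).foldl (fun d i => d.insert i 0) PySem.Dict.empty

def process_operations (operations : List String) : List String :=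
  (operations.foldl pvA_step (PySem.Dict.empty, pvA_counts0, [])).2.2

-- ===== PORT B =====
-- the event log: ('new', dni) and ('sub', dni, puntos)
inductive PvEvent where
  | newE : String → PvEvent
  | subE : String → Int → PvEvent
deriving DecidableEq, Repr

def pvRegistered (log : List PvEvent) (dni : String) : Bool :=
  log.any fun e => match e with | .newE d => d == dni | .subE _ _ => false

def pvPoints (log : List PvEvent) (dni : String) : Int :=
  log.foldl (fun p e => match e with
    | .subE d q => if d == dni then max 0 (p - q) else p
    | .newE _ => p) 15

-- state: (log, output)
def pvB_step (st : List PvEvent × List String) (op : String) : List PvEvent × List String :=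
  match st with
  | (log, output) =>
    match PySem.Str.split₀ op with
    | [] => (log, output)
    | cmd :: rest =>
      if cmd = "nuevo" then
        match rest with
        | [] => (log, output)
        | dni :: _ =>
          if pvRegistered log dni then (log, output ++ ["ERROR: Conductor duplicado"])
          else (log ++ [PvEvent.newE dni], output)
      else if cmd = "quitar" then
        match rest with
        | dni :: sp :: _ =>
          match PySem.Int.ofStr? sp with
          | none => (log, output ++ [pvIntErr sp])
          | some puntos =>
            if pvRegistered log dni then (log ++ [PvEvent.subE dni puntos], output)
            else (log, output ++ ["ERROR: Conductor inexistente"])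
        | _ => (log, output)
      else if cmd = "consultar" then
        match rest with
        | [] => (log, output)
        | dni :: _ =>
          if pvRegistered log dni then
            (log, output ++ ["Puntos de " ++ dni ++ ": " ++ PySem.Int.toStr (pvPoints log dni)])
          else (log, output ++ ["ERROR: Conductor inexistente"])
      else if cmd = "cuantos_con_puntos" then
        match rest with
        | [] => (log, output)
        | s :: _ =>
          match PySem.Int.ofStr? s with
          | none => (log, output ++ [pvIntErr s])
          | some puntos =>
            if puntos < 0 ∨ 15 < puntos then (log, output ++ ["ERROR: Puntos no validos"])
            else
              (log, output ++ ["Con " ++ s ++ " puntos hay " ++ PySem.Int.toStr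
                 ((log.countP (fun e => match e with
                     | .newE d => pvPoints log d == puntos
                     | .subE _ _ => false) : Nat) : Int)])
      else (log, output)

def process_operations_alt (operations : List String) : List String :=
  (operations.foldl pvB_step ([], [])).2

-- ===== PRECONDITION & SPEC =====
-- Pre_ excludes operations on which A raises: lines whose recognised command lacks the
-- arguments it indexes (IndexError, including the all-whitespace line), and quitar lines whose
-- parsed amount is negative, on which A can raise an uncaught KeyError (points pushed above 15)
-- depending on the current state — where A happens to return there, both programs agree.
def pvPreOp (op : String) : Bool :=
  match PySem.Str.split₀ op with
  | [] => false
  | cmd :: rest =>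
    if cmd = "nuevo" ∨ cmd = "consultar" then !rest.isEmpty
    else if cmd = "quitar" then
      match rest with
      | _ :: sp :: _ =>
        match PySem.Int.ofStr? sp with
        | some p => decide (0 ≤ p)
        | none => true
      | _ => false
    else if cmd = "cuantos_con_puntos" then !rest.isEmpty
    else true

-- e.g. "quitar ab x" is admitted (A catches the int() ValueError)
def Pre_process_operations (operations : List String) : Prop :=
  operations.all pvPreOp = true

instance (operations : List String) : Decidable (Pre_process_operations operations) := by
  unfold Pre_process_operations; infer_instance

def pvWitness_process_operations : List String :=
  ["nuevo abc", "quitar abc 7", "consultar abc", "nuevo abc", "cuantos_con_puntos 8", "quitar zz 1", "quitar abc x"]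

def Spec_process_operations (operations : List String) (out : List String) : Prop :=
  out = process_operations_alt operations
instance (operations : List String) (out : List String) : Decidable (Spec_process_operations operations out) := by
  unfold Spec_process_operations; infer_instance

-- ===== CLAIM (what is proved, stated in full; the proofs are below) =====
def Claim_equal_process_operations : Prop := ∀ (operations : List String), Dom_process_operations operations → Pre_process_operations operations → Spec_process_operations operations (process_operations operations)

-- ===== LEMMAS AND PROOFS =====

-- A-side invariant: the histogram counts exactly the drivers with each point value,
-- keys stay unique and every stored value is in 0..15
def pvInv (drivers : PySem.Dict String Int) (counts : PySem.Dict Int Int) : Prop :=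
  drivers.keys.Nodup ∧ (∀ v ∈ drivers.values, 0 ≤ v ∧ v ≤ 15) ∧
  ∀ p : Int, counts.getD p 0 = (drivers.values.countP (fun v => v == p) : Int)

-- coupling: A's dict is exactly the replay of B's log, and unregistered drivers replay to 15
def pvNews (log : List PvEvent) : List String :=
  log.filterMap fun e => match e with | .newE d => some d | .subE _ _ => none

def pvCouple (log : List PvEvent) (drivers : PySem.Dict String Int) : Prop :=
  drivers.items = (pvNews log).map (fun d => (d, pvPoints log d)) ∧
  ∀ d, d ∉ pvNews log → pvPoints log d = 15

lemma pvReplaceId (l : List (String × Int)) (k : String) (v : Int)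
    (h : k ∉ l.map Prod.fst) :
    l.map (fun q => if q.1 = k then (k, v) else q) = l := by
  induction l with
  | nil => rfl
  | cons q t ih =>
    simp only [List.map_cons, List.mem_cons, not_or] at h
    simp only [List.map_cons]
    rw [if_neg (fun hh => h.1 hh.symm), ih h.2]

lemma pvReplaceFst (l : List (String × Int)) (k : String) (v : Int) :
    (l.map (fun q => if q.1 = k then (k, v) else q)).map Prod.fst = l.map Prod.fst := by
  induction l with
  | nil => rfl
  | cons q t ih =>
    simp only [List.map_cons]
    by_cases h : q.1 = k
    · rw [if_pos h, ih]; simp [h]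
    · rw [if_neg h, ih]

lemma pvReplaceCount (l : List (String × Int)) (k : String) (v cur p : Int)
    (hnd : (l.map Prod.fst).Nodup) (hmem : (k, cur) ∈ l) :
    ((l.map (fun q => if q.1 = k then (k, v) else q)).map Prod.snd).countP (fun x => x == p)
      + (if cur = p then 1 else 0)
    = (l.map Prod.snd).countP (fun x => x == p) + (if v = p then 1 else 0) := by
  induction l with
  | nil => simp at hmem
  | cons q t ih =>
    simp only [List.map_cons, List.nodup_cons] at hnd
    rcases List.mem_cons.mp hmem with hq | ht
    · have hq' : q = (k, cur) := hq.symm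
      subst hq'
      simp only [List.map_cons, if_true]
      rw [pvReplaceId t k v hnd.1]
      simp only [List.countP_cons, beq_iff_eq]
      split_ifs <;> omega
    · have hqk : ¬ (q.1 = k) := by
        intro h; exact hnd.1 (h ▸ (List.mem_map.mpr ⟨(k, cur), ht, rfl⟩))
      simp only [List.map_cons]
      rw [if_neg hqk]
      simp only [List.countP_cons]
      have := ih hnd.2 ht
      omega

lemma pvCounts0_getD (p : Int) : pvA_counts0.getD p 0 = 0 := by
  have key : ∀ (l : List Int) (d : PySem.Dict Int Int), (∀ q : Int, d.getD q 0 = 0) →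
      (l.foldl (fun d i => d.insert i 0) d).getD p 0 = 0 := by
    intro l
    induction l with
    | nil => intro d h; exact h p
    | cons i t ih =>
      intro d h
      refine ih _ (fun q => ?_)
      rw [PySem.Dict.getD_insert]
      split <;> [rfl; exact h q]
  exact key _ _ (fun q => PySem.Dict.getD_empty q 0)

lemma pvInv_nuevo (dr : PySem.Dict String Int) (c : PySem.Dict Int Int) (dni : String)
    (hc : dr.contains dni = false) (hinv : pvInv dr c) :
    pvInv (dr.insert dni 15) (c.insert 15 (c.getD 15 0 + 1)) := by
  obtain ⟨hnd, hbd, hcnt⟩ := hinv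
  have hit := PySem.Dict.items_insert_of_not_contains dr (15 : Int) hc
  have hkeys : (dr.insert dni 15).keys = dr.keys ++ [dni] := by
    simp [PySem.Dict.keys, hit]
  have hvals : (dr.insert dni 15).values = dr.values ++ [15] := by
    simp [PySem.Dict.values, hit]
  have hmem : dni ∉ dr.keys := by
    rw [PySem.Dict.contains_eq_decide_mem_keys] at hc; simpa using hc
  refine ⟨?_, ?_, ?_⟩
  · rw [hkeys]
    simp [List.nodup_append, hnd]
    exact fun a ha h => hmem (h ▸ ha)
  · intro v hv
    rw [hvals] at hv
    rcases List.mem_append.mp hv with h | h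
    · exact hbd v h
    · simp at h; omega
  · intro p
    rw [PySem.Dict.getD_insert, hvals, List.countP_append]
    have h1 := hcnt p
    rcases eq_or_ne p (15 : Int) with h | h
    · subst h
      have hone : List.countP (fun x => x == (15 : Int)) [(15 : Int)] = 1 := by decide
      rw [if_pos rfl, hone]
      push_cast
      omega
    · have h' : ((15 : Int) == p) = false := by
        rw [beq_eq_false_iff_ne]; exact (Ne.symm h)
      have hzero : List.countP (fun x => x == p) [(15 : Int)] = 0 := by simp [h']
      rw [if_neg h, hzero]
      push_cast
      omega

lemma pvInv_quitar (dr : PySem.Dict String Int) (c : PySem.Dict Int Int) (dni : String) (puntos : Int)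
    (hc : dr.contains dni = true) (hp : 0 ≤ puntos) (hinv : pvInv dr c) :
    pvInv (dr.insert dni (max 0 (dr.getD dni 0 - puntos)))
      ((c.insert (dr.getD dni 0) (c.getD (dr.getD dni 0) 0 - 1)).insert
        (max 0 (dr.getD dni 0 - puntos))
        ((c.insert (dr.getD dni 0) (c.getD (dr.getD dni 0) 0 - 1)).getD
          (max 0 (dr.getD dni 0 - puntos)) 0 + 1)) := by
  obtain ⟨hnd, hbd, hcnt⟩ := hinv
  obtain ⟨cu, hcu⟩ : ∃ cu, dr.get? dni = some cu := by
    rw [PySem.Dict.contains_eq_isSome_get?] at hc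
    exact Option.isSome_iff_exists.mp hc
  have hcur : dr.getD dni 0 = cu := PySem.Dict.getD_of_get?_eq_some dr 0 hcu
  have hmemit : (dni, cu) ∈ dr.items := PySem.Dict.mem_items_of_get?_eq_some dr hcu
  have hcuv : cu ∈ dr.values := by
    simp only [PySem.Dict.values]
    exact List.mem_map.mpr ⟨(dni, cu), hmemit, rfl⟩
  have hcub := hbd cu hcuv
  have hndfst : (dr.items.map Prod.fst).Nodup := hnd
  rw [hcur]
  have hit := PySem.Dict.items_insert_of_contains dr (max 0 (cu - puntos)) hc
  have hit' : (dr.insert dni (max 0 (cu - puntos))).items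
      = dr.items.map (fun q => if q.1 = dni then (dni, max 0 (cu - puntos)) else q) := by
    rw [hit]; simp only [beq_iff_eq]
  have hkeys : (dr.insert dni (max 0 (cu - puntos))).keys = dr.keys := by
    simp only [PySem.Dict.keys, hit']
    exact pvReplaceFst _ _ _
  have hVals' : (dr.insert dni (max 0 (cu - puntos))).values
      = (dr.items.map (fun q => if q.1 = dni then (dni, max 0 (cu - puntos)) else q)).map Prod.snd := by
    simp only [PySem.Dict.values, hit']
  have hdv : dr.items.map Prod.snd = dr.values := rfl
  refine ⟨by rw [hkeys]; exact hnd, ?_, ?_⟩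
  · intro v hv
    rcases PySem.Dict.mem_values_insert dr dni (max 0 (cu - puntos)) v hv with h | h
    · constructor <;> omega
    · exact hbd v h
  · intro p0
    have hrc := pvReplaceCount dr.items dni (max 0 (cu - puntos)) cu p0 hndfst hmemit
    rw [hdv] at hrc
    have h1 := hcnt p0
    simp only [PySem.Dict.getD_insert]
    rw [hVals']
    rcases eq_or_ne cu p0 with hc1 | hc1
    · subst hc1
      rcases eq_or_ne (max 0 (cu - puntos)) cu with hc2 | hc2
      · rw [if_pos rfl, if_pos hc2] at hrc
        rw [if_pos hc2.symm, if_pos hc2]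
        have hZ := congrArg (fun n : Nat => (n : Int)) hrc
        push_cast at hZ
        omega
      · rw [if_pos rfl, if_neg hc2] at hrc
        rw [if_neg (fun h => hc2 h.symm), if_pos rfl]
        have hZ := congrArg (fun n : Nat => (n : Int)) hrc
        push_cast at hZ
        omega
    · rw [if_neg hc1] at hrc
      rcases eq_or_ne (max 0 (cu - puntos)) p0 with hc2 | hc2
      · rw [if_pos hc2] at hrc
        rw [hc2] at hrc
        rw [if_pos hc2.symm, if_neg (fun h => hc1 (h.symm.trans hc2)), hc2]
        have hZ := congrArg (fun n : Nat => (n : Int)) hrc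
        push_cast at hZ
        omega
      · rw [if_neg hc2] at hrc
        rw [if_neg (fun h => hc2 h.symm), if_neg (fun h => hc1 h.symm)]
        have hZ := congrArg (fun n : Nat => (n : Int)) hrc
        push_cast at hZ
        omega

-- replay facts about the log
lemma pvNews_append_new (log : List PvEvent) (d : String) :
    pvNews (log ++ [PvEvent.newE d]) = pvNews log ++ [d] := by
  simp [pvNews, List.filterMap_append]

lemma pvNews_append_sub (log : List PvEvent) (d : String) (q : Int) :
    pvNews (log ++ [PvEvent.subE d q]) = pvNews log := by
  simp [pvNews, List.filterMap_append]

lemma pvPoints_append_new (log : List PvEvent) (d' d : String) :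
    pvPoints (log ++ [PvEvent.newE d']) d = pvPoints log d := by
  simp [pvPoints, List.foldl_append]

lemma pvPoints_append_sub (log : List PvEvent) (d' d : String) (q : Int) :
    pvPoints (log ++ [PvEvent.subE d' q]) d
      = if d' = d then max 0 (pvPoints log d - q) else pvPoints log d := by
  simp only [pvPoints, List.foldl_append, List.foldl_cons, List.foldl_nil, beq_iff_eq]

lemma pvRegistered_eq (log : List PvEvent) (dni : String) :
    pvRegistered log dni = decide (dni ∈ pvNews log) := by
  induction log with
  | nil => rfl
  | cons e t ih =>
    cases e with
    | newE d =>
      have h1 : pvRegistered (PvEvent.newE d :: t) dni = (d == dni || pvRegistered t dni) := rfl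
      have h2 : pvNews (PvEvent.newE d :: t) = d :: pvNews t := rfl
      rw [h1, h2, ih]
      by_cases h : d = dni
      · subst h; simp
      · simp [h, Ne.symm h]
    | subE d q =>
      have h1 : pvRegistered (PvEvent.subE d q :: t) dni = (false || pvRegistered t dni) := rfl
      have h2 : pvNews (PvEvent.subE d q :: t) = pvNews t := rfl
      rw [h1, h2, Bool.false_or, ih]

lemma pvCountP_news (log : List PvEvent) (g : String → Bool) :
    (log.countP (fun e => match e with | .newE d => g d | .subE _ _ => false))
      = (pvNews log).countP g := by
  induction log with
  | nil => rfl
  | cons e t ih =>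
    cases e with
    | newE d => simp [pvNews, List.countP_cons, ih]
    | subE d q => simp [pvNews, ih]

lemma pvKeys_eq (log : List PvEvent) (dr : PySem.Dict String Int)
    (hc : pvCouple log dr) : dr.keys = pvNews log := by
  have h0 : dr.keys = dr.items.map Prod.fst := rfl
  rw [h0, hc.1, List.map_map]
  have h1 : (Prod.fst ∘ fun d => (d, pvPoints log d)) = id := rfl
  rw [h1, List.map_id]

lemma pvContains_eq (log : List PvEvent) (dr : PySem.Dict String Int)
    (hc : pvCouple log dr) (dni : String) :
    dr.contains dni = pvRegistered log dni := by
  rw [PySem.Dict.contains_eq_decide_mem_keys, pvKeys_eq log dr hc, pvRegistered_eq]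

lemma pvValues_eq (log : List PvEvent) (dr : PySem.Dict String Int)
    (hc : pvCouple log dr) : dr.values = (pvNews log).map (pvPoints log) := by
  have : dr.values = dr.items.map Prod.snd := rfl
  rw [this, hc.1, List.map_map]
  rfl

lemma pvGetD_eq (log : List PvEvent) (dr : PySem.Dict String Int)
    (hc : pvCouple log dr) (hnd : dr.keys.Nodup) (dni : String)
    (hreg : pvRegistered log dni = true) :
    dr.getD dni 0 = pvPoints log dni := by
  rw [pvRegistered_eq] at hreg
  have hmem : dni ∈ pvNews log := by simpa using hreg
  have : (dni, pvPoints log dni) ∈ dr.items := by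
    rw [hc.1]; exact List.mem_map.mpr ⟨dni, hmem, rfl⟩
  exact PySem.Dict.getD_of_mem_items dr this hnd 0

lemma pvCouple_nuevo (log : List PvEvent) (dr : PySem.Dict String Int) (dni : String)
    (hreg : pvRegistered log dni = false) (hc : pvCouple log dr) :
    pvCouple (log ++ [PvEvent.newE dni]) (dr.insert dni 15) := by
  have hnm : dni ∉ pvNews log := by
    rw [pvRegistered_eq] at hreg; simpa using hreg
  have hcontains : dr.contains dni = false := by
    rw [pvContains_eq log dr hc]; exact hreg
  constructor
  · rw [PySem.Dict.items_insert_of_not_contains dr (15 : Int) hcontains, hc.1,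
      pvNews_append_new, List.map_append]
    have hfun : ∀ d, (fun d => (d, pvPoints (log ++ [PvEvent.newE dni]) d)) d
        = (fun d => (d, pvPoints log d)) d := by
      intro d; simp [pvPoints_append_new]
    rw [funext hfun]
    simp [hc.2 dni hnm]
  · intro d hd
    rw [pvNews_append_new] at hd
    simp only [List.mem_append, List.mem_singleton, not_or] at hd
    rw [pvPoints_append_new]
    exact hc.2 d hd.1

lemma pvCouple_quitar (log : List PvEvent) (dr : PySem.Dict String Int) (dni : String) (q : Int)
    (hreg : pvRegistered log dni = true) (hnd : dr.keys.Nodup) (hc : pvCouple log dr) :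
    pvCouple (log ++ [PvEvent.subE dni q]) (dr.insert dni (max 0 (dr.getD dni 0 - q))) := by
  have hcontains : dr.contains dni = true := by rw [pvContains_eq log dr hc]; exact hreg
  have hgd : dr.getD dni 0 = pvPoints log dni := pvGetD_eq log dr hc hnd dni hreg
  constructor
  · rw [PySem.Dict.items_insert_of_contains dr _ hcontains, hc.1, pvNews_append_sub,
      List.map_map]
    apply List.map_congr_left
    intro d _
    simp only [Function.comp]
    by_cases h : d = dni
    · subst h
      simp [pvPoints_append_sub, hgd]
    · simp [pvPoints_append_sub, h, Ne.symm h]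
  · intro d hd
    rw [pvNews_append_sub] at hd
    have hne : dni ≠ d := by
      intro h; subst h
      rw [pvRegistered_eq] at hreg
      exact hd (by simpa using hreg)
    rw [pvPoints_append_sub, if_neg hne]
    exact hc.2 d hd

-- one operation: under the invariants, A's and B's steps produce the same output,
-- A's state stays invariant and stays coupled to B's log
lemma pvStep (op : String) (dr : PySem.Dict String Int) (c : PySem.Dict Int Int)
    (log : List PvEvent) (o : List String)
    (hpre : pvPreOp op = true) (hinv : pvInv dr c) (hc : pvCouple log dr) :
    (pvA_step (dr, c, o) op).2.2 = (pvB_step (log, o) op).2 ∧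
    pvInv (pvA_step (dr, c, o) op).1 (pvA_step (dr, c, o) op).2.1 ∧
    pvCouple (pvB_step (log, o) op).1 (pvA_step (dr, c, o) op).1 := by
  unfold pvPreOp at hpre
  cases hsp : PySem.Str.split₀ op with
  | nil => rw [hsp] at hpre; simp at hpre
  | cons cmd rest =>
    rw [hsp] at hpre
    simp only [pvA_step, pvB_step, hsp]
    by_cases h1 : cmd = "nuevo"
    · subst h1
      simp at hpre
      simp only [if_true]
      cases rest with
      | nil => simp at hpre
      | cons dni r =>
        by_cases hreg : pvRegistered log dni
        · simp only [pvContains_eq log dr hc, if_pos hreg]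
          exact ⟨by trivial, hinv, hc⟩
        · simp only [Bool.not_eq_true] at hreg
          simp only [pvContains_eq log dr hc, hreg, Bool.false_eq_true, if_false]
          have hcontains : dr.contains dni = false := by
            rw [pvContains_eq log dr hc]; exact hreg
          exact ⟨by trivial, pvInv_nuevo dr c dni hcontains hinv, pvCouple_nuevo log dr dni hreg hc⟩
    · simp only [if_neg h1]
      by_cases h2 : cmd = "quitar"
      · subst h2
        simp at hpre
        simp only [if_true]
        cases rest with
        | nil => simp at hpre
        | cons dni rest2 =>
          cases rest2 with
          | nil => simp at hpre
          | cons sp r =>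
            simp at hpre
            cases hof : PySem.Int.ofStr? sp with
            | none =>
              simp only [hof]
              exact ⟨by trivial, hinv, hc⟩
            | some puntos =>
              rw [hof] at hpre
              have hp : 0 ≤ puntos := by simpa using hpre
              by_cases hreg : pvRegistered log dni
              · simp only [hof, pvContains_eq log dr hc, if_pos hreg]
                have hcontains : dr.contains dni = true := by
                  rw [pvContains_eq log dr hc]; exact hreg
                exact ⟨by trivial, pvInv_quitar dr c dni puntos hcontains hp hinv,
                  pvCouple_quitar log dr dni puntos hreg hinv.1 hc⟩
              · simp only [Bool.not_eq_true] at hreg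
                simp only [hof, pvContains_eq log dr hc, hreg, Bool.false_eq_true, if_false]
                exact ⟨by trivial, hinv, hc⟩
      · simp only [if_neg h2]
        by_cases h3 : cmd = "consultar"
        · subst h3
          simp at hpre
          simp only [if_true]
          cases rest with
          | nil => simp at hpre
          | cons dni r =>
            by_cases hreg : pvRegistered log dni
            · simp only [pvContains_eq log dr hc, if_pos hreg,
                pvGetD_eq log dr hc hinv.1 dni hreg]
              exact ⟨by trivial, hinv, hc⟩
            · simp only [Bool.not_eq_true] at hreg
              simp only [pvContains_eq log dr hc, hreg, Bool.false_eq_true, if_false]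
              exact ⟨by trivial, hinv, hc⟩
        · simp only [if_neg h3]
          by_cases h4 : cmd = "cuantos_con_puntos"
          · subst h4
            simp at hpre
            simp only [if_true]
            cases rest with
            | nil => simp at hpre
            | cons s r =>
              cases hof : PySem.Int.ofStr? s with
              | none =>
                simp only [hof]
                exact ⟨by trivial, hinv, hc⟩
              | some puntos =>
                simp only [hof]
                by_cases hr : puntos < 0 ∨ 15 < puntos
                · simp only [if_pos hr]
                  exact ⟨by trivial, hinv, hc⟩
                · simp only [if_neg hr]
                  refine ⟨?_, hinv, hc⟩
                  have hcnt := hinv.2.2 puntos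
                  rw [pvValues_eq log dr hc] at hcnt
                  have hm : List.countP (fun v => v == puntos) ((pvNews log).map (pvPoints log))
                      = List.countP (fun d => pvPoints log d == puntos) (pvNews log) := by
                    rw [List.countP_map]
                    rfl
                  rw [hcnt, pvCountP_news log (fun d => pvPoints log d == puntos), hm]
          · simp only [if_neg h4]
            exact ⟨by trivial, hinv, hc⟩

lemma pvFold (ops : List String) (dr : PySem.Dict String Int) (c : PySem.Dict Int Int)
    (log : List PvEvent) (o : List String)
    (hpre : ops.all pvPreOp = true) (hinv : pvInv dr c) (hc : pvCouple log dr) :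
    (ops.foldl pvA_step (dr, c, o)).2.2 = (ops.foldl pvB_step (log, o)).2 := by
  induction ops generalizing dr c log o with
  | nil => rfl
  | cons op t ih =>
    simp only [List.all_cons, Bool.and_eq_true] at hpre
    obtain ⟨h1, h2, h3⟩ := pvStep op dr c log o hpre.1 hinv hc
    simp only [List.foldl_cons]
    have hB : pvB_step (log, o) op = ((pvB_step (log, o) op).1, (pvA_step (dr, c, o) op).2.2) := by
      rw [h1]
    rw [hB]
    exact ih _ _ _ _ hpre.2 h2 h3

lemma pvInv_init : pvInv PySem.Dict.empty pvA_counts0 := by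
  refine ⟨by simp [PySem.Dict.keys, PySem.Dict.empty], by simp [PySem.Dict.values, PySem.Dict.empty], ?_⟩
  intro p
  rw [pvCounts0_getD]
  simp [PySem.Dict.values, PySem.Dict.empty]

lemma pvCouple_init : pvCouple [] PySem.Dict.empty := by
  constructor
  · rfl
  · intro d _; rfl

-- ===== VERDICT (by name: the statement is the Claim_ definition above) =====
theorem process_operations_spec : Claim_equal_process_operations := by
  intro operations _ hpre
  unfold Spec_process_operations process_operations process_operations_alt
  exact pvFold operations _ _ _ _ hpre pvInv_init pvCouple_init
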